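-- pv_equiv track=rewrite | github.com/josv-sys/MercaditoMovil | MercaditoMovil/MercaditoMovil.Infrastructure/Tools/Scripts/create_csvs.py | pick_market
-- ===== SOURCE A (Python) =====
-- GAM_PROVINCES = {"San Jose", "Heredia", "Alajuela", "Cartago"}
--
-- MARKETS = [
--     ("MKT-000","Fuera de cobertura GAM","Cobertura","NoGAM","FueraDeGAM"),
--     ("MKT-001","Feria del Agricultor Heredia - La Perla","Heredia","Heredia","Mercedes Norte"),
--     ("MKT-002","Feria del Agricultor Grecia","Alajuela","Grecia","La Arena"),
--     ("MKT-003","Feria del Agricultor Pavas","San Jose","San Jose","Pavas"),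
--     ("MKT-004","Feria Verde de Aranjuez","San Jose","San Jose","Aranjuez"),
--     ("MKT-005","Feria del Agricultor Zapote","San Jose","San Jose","Zapote"),
--     ("MKT-006","Feria del Agricultor Escazu","San Jose","Escazu","Escazu Centro"),
--     ("MKT-007","Feria del Agricultor Guachipelin","San Jose","Escazu","Guachipelin"),
--     ("MKT-008","Feria del Agricultor San Sebastian","San Jose","San Jose","San Sebastian"),
--     ("MKT-009","Feria del Agricultor Alajuelita","San Jose","Alajuelita","Alajuelita"),
--     ("MKT-010","Feria del Agricultor Belen","Heredia","Belen","San Antonio"),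
--     ("MKT-011","Feria del Agricultor Barva","Heredia","Barva","Barva Centro"),
--     ("MKT-012","Feria del Agricultor Santo Domingo","Heredia","Santo Domingo","Santo Domingo"),
--     ("MKT-013","Feria del Agricultor Alajuela Centro","Alajuela","Alajuela","Alajuela Centro"),
--     ("MKT-014","Feria del Agricultor Cartago Centro","Cartago","Cartago","Oriental"),
--     ("MKT-015","Feria del Agricultor Paraiso","Cartago","Paraiso","Paraiso Centro"),
-- ]
--
-- def pick_market(province: str, district: str) -> str:
--     if province not in GAM_PROVINCES:
--         return "MKT-000"
--     # exact district match
--     for mid,_,prov,_,dist in MARKETS: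
--         if prov.lower()==province.lower() and dist.lower()==district.lower():
--             return mid
--     # same province fallback
--     for mid,_,prov,_,_ in MARKETS:
--         if prov.lower()==province.lower():
--             return mid
--     return "MKT-000"
-- ===== SOURCE B (Python) =====
-- GAM_PROVINCES = {"San Jose", "Heredia", "Alajuela", "Cartago"}
--
-- MARKETS = [
--     ("MKT-000","Fuera de cobertura GAM","Cobertura","NoGAM","FueraDeGAM"),
--     ("MKT-001","Feria del Agricultor Heredia - La Perla","Heredia","Heredia","Mercedes Norte"),
--     ("MKT-002","Feria del Agricultor Grecia","Alajuela","Grecia","La Arena"),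
--     ("MKT-003","Feria del Agricultor Pavas","San Jose","San Jose","Pavas"),
--     ("MKT-004","Feria Verde de Aranjuez","San Jose","San Jose","Aranjuez"),
--     ("MKT-005","Feria del Agricultor Zapote","San Jose","San Jose","Zapote"),
--     ("MKT-006","Feria del Agricultor Escazu","San Jose","Escazu","Escazu Centro"),
--     ("MKT-007","Feria del Agricultor Guachipelin","San Jose","Escazu","Guachipelin"),
--     ("MKT-008","Feria del Agricultor San Sebastian","San Jose","San Jose","San Sebastian"),
--     ("MKT-009","Feria del Agricultor Alajuelita","San Jose","Alajuelita","Alajuelita"),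
--     ("MKT-010","Feria del Agricultor Belen","Heredia","Belen","San Antonio"),
--     ("MKT-011","Feria del Agricultor Barva","Heredia","Barva","Barva Centro"),
--     ("MKT-012","Feria del Agricultor Santo Domingo","Heredia","Santo Domingo","Santo Domingo"),
--     ("MKT-013","Feria del Agricultor Alajuela Centro","Alajuela","Alajuela","Alajuela Centro"),
--     ("MKT-014","Feria del Agricultor Cartago Centro","Cartago","Cartago","Oriental"),
--     ("MKT-015","Feria del Agricultor Paraiso","Cartago","Paraiso","Paraiso Centro"),
-- ]
--
-- def _build_index(markets):
--     """Index markets once: first market per (province, district) key and per province key."""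
--     exact = {}
--     by_province = {}
--     for mid, _, prov, _, dist in markets:
--         exact.setdefault((prov.lower(), dist.lower()), mid)
--         by_province.setdefault(prov.lower(), mid)
--     return exact, by_province
--
-- def pick_market(province: str, district: str) -> str:
--     if province not in GAM_PROVINCES:
--         return "MKT-000"
--     exact, by_province = _build_index(MARKETS)
--     p, d = province.lower(), district.lower()
--     return exact.get((p, d), by_province.get(p, "MKT-000"))
-- ===== Notes on version B (the rewrite author's own statement) =====
-- stated objective: alternative
-- what changed: Instead of A's two sequential scans of MARKETS (exact district match, then a province-only rescan), B builds two first-wins dictionaries in one indexing pass -- one keyed by (province,district) lowercase, one keyed by province lowercase -- and answers with two dictionary lookups.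
import Mathlib
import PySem

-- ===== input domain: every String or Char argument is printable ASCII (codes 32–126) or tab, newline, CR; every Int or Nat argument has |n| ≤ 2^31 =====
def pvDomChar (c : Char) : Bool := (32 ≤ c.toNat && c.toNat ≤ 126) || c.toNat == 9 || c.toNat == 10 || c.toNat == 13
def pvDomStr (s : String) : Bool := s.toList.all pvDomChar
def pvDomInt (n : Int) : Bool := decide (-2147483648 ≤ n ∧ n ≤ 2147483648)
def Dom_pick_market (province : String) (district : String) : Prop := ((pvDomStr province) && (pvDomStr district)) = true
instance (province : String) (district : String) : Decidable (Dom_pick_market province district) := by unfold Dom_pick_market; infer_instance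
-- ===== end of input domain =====

-- B replaces A's two sequential scans of MARKETS with a one-pass build of two first-wins
-- dictionaries (keyed by lowercased (province, district) and by lowercased province) followed
-- by two lookups; same return value, objective: alternative.

def pvGam : List String := ["San Jose", "Heredia", "Alajuela", "Cartago"]

def pvMarkets : List (String × String × String × String × String) :=
  [("MKT-000","Fuera de cobertura GAM","Cobertura","NoGAM","FueraDeGAM"),
   ("MKT-001","Feria del Agricultor Heredia - La Perla","Heredia","Heredia","Mercedes Norte"),
   ("MKT-002","Feria del Agricultor Grecia","Alajuela","Grecia","La Arena"),
   ("MKT-003","Feria del Agricultor Pavas","San Jose","San Jose","Pavas"),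
   ("MKT-004","Feria Verde de Aranjuez","San Jose","San Jose","Aranjuez"),
   ("MKT-005","Feria del Agricultor Zapote","San Jose","San Jose","Zapote"),
   ("MKT-006","Feria del Agricultor Escazu","San Jose","Escazu","Escazu Centro"),
   ("MKT-007","Feria del Agricultor Guachipelin","San Jose","Escazu","Guachipelin"),
   ("MKT-008","Feria del Agricultor San Sebastian","San Jose","San Jose","San Sebastian"),
   ("MKT-009","Feria del Agricultor Alajuelita","San Jose","Alajuelita","Alajuelita"),
   ("MKT-010","Feria del Agricultor Belen","Heredia","Belen","San Antonio"),
   ("MKT-011","Feria del Agricultor Barva","Heredia","Barva","Barva Centro"),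
   ("MKT-012","Feria del Agricultor Santo Domingo","Heredia","Santo Domingo","Santo Domingo"),
   ("MKT-013","Feria del Agricultor Alajuela Centro","Alajuela","Alajuela","Alajuela Centro"),
   ("MKT-014","Feria del Agricultor Cartago Centro","Cartago","Cartago","Oriental"),
   ("MKT-015","Feria del Agricultor Paraiso","Cartago","Paraiso","Paraiso Centro")]

-- ===== PORT A =====
-- A's second loop ("same province fallback"), scanning MARKETS from the start
def pvALoop2 (province : String) : List (String × String × String × String × String) → String
  | [] => "MKT-000"
  | (mid, _, prov, _, _) :: rest =>
      if PySem.Str.lower prov == PySem.Str.lower province then mid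
      else pvALoop2 province rest

-- A's first loop ("exact district match"); fall-through runs the second loop on all of MARKETS
def pvALoop1 (province district : String) : List (String × String × String × String × String) → String
  | [] => pvALoop2 province pvMarkets
  | (mid, _, prov, _, dist) :: rest =>
      if PySem.Str.lower prov == PySem.Str.lower province
         && PySem.Str.lower dist == PySem.Str.lower district then mid
      else pvALoop1 province district rest

def pick_market (province : String) (district : String) : String :=
  if !(pvGam.contains province) then "MKT-000"
  else pvALoop1 province district pvMarkets

-- ===== PORT B =====
-- B's indexing pass (_build_index): first market per (province, district) key and per province key
def pvIdxStep (acc : PySem.Dict (String × String) String × PySem.Dict String String)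
    (m : String × String × String × String × String) :
    PySem.Dict (String × String) String × PySem.Dict String String :=
  match m with
  | (mid, _, prov, _, dist) =>
      (acc.1.setdefault (PySem.Str.lower prov, PySem.Str.lower dist) mid,
       acc.2.setdefault (PySem.Str.lower prov) mid)

def pvBuildIndex (markets : List (String × String × String × String × String)) :
    PySem.Dict (String × String) String × PySem.Dict String String :=
  markets.foldl pvIdxStep (PySem.Dict.empty, PySem.Dict.empty)

def pick_market_alt (province : String) (district : String) : String :=
  if !(pvGam.contains province) then "MKT-000"
  else
    let idx := pvBuildIndex pvMarkets
    let p := PySem.Str.lower province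
    let d := PySem.Str.lower district
    (idx.1.get? (p, d)).getD ((idx.2.get? p).getD "MKT-000")

-- ===== PRECONDITION & SPEC =====
def Spec_pick_market (province : String) (district : String) (out : String) : Prop := out = pick_market_alt province district
instance (province : String) (district : String) (out : String) : Decidable (Spec_pick_market province district out) := by unfold Spec_pick_market; infer_instance

-- ===== CLAIM =====
def Claim_equal_pick_market : Prop := ∀ (province : String) (district : String), Dom_pick_market province district → Spec_pick_market province district (pick_market province district)

-- ===== LEMMAS AND PROOFS =====

-- first exact (province and district) match in the list
def pvExFind (p d : String) : List (String × String × String × String × String) → Option String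
  | [] => none
  | (mid, _, prov, _, dist) :: rest =>
      if PySem.Str.lower prov == p && PySem.Str.lower dist == d then some mid
      else pvExFind p d rest

-- first province-only match in the list
def pvPrFind (p : String) : List (String × String × String × String × String) → Option String
  | [] => none
  | (mid, _, prov, _, _) :: rest =>
      if PySem.Str.lower prov == p then some mid else pvPrFind p rest

theorem pvALoop2_char (province : String) (l : List (String × String × String × String × String)) :
    pvALoop2 province l = (pvPrFind (PySem.Str.lower province) l).getD "MKT-000" := by
  induction l with
  | nil => rfl
  | cons m rest ih =>
      obtain ⟨mid, n, prov, c, dist⟩ := m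
      simp only [pvALoop2, pvPrFind]
      split_ifs <;> simp_all

theorem pvALoop1_char (province district : String) (l : List (String × String × String × String × String)) :
    pvALoop1 province district l
      = (pvExFind (PySem.Str.lower province) (PySem.Str.lower district) l).getD
          (pvALoop2 province pvMarkets) := by
  induction l with
  | nil => rfl
  | cons m rest ih =>
      obtain ⟨mid, n, prov, c, dist⟩ := m
      simp only [pvALoop1, pvExFind]
      split_ifs <;> simp_all

theorem get?_setdefault {κ ν : Type} [BEq κ] [LawfulBEq κ] [DecidableEq κ] (d : PySem.Dict κ ν) (k k' : κ) (v : ν) :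
    (d.setdefault k v).get? k' = if k' == k then some ((d.get? k).getD v) else d.get? k' := by
  unfold PySem.Dict.setdefault
  by_cases hc : d.contains k = true
  · have := PySem.Dict.contains_eq_isSome_get? (d := d) (k := k)
    rw [hc] at this
    obtain ⟨w, hw⟩ := Option.isSome_iff_exists.mp this.symm
    simp [hc, hw]
    intro h; subst h; simp [hw]
  · have h2 := PySem.Dict.contains_eq_isSome_get? (d := d) (k := k)
    rw [Bool.not_eq_true] at hc
    rw [hc] at h2
    have hn : d.get? k = none := by
      cases h : d.get? k with
      | none => rfl
      | some w => rw [h] at h2; simp at h2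
    rw [if_neg (by simp [hc])]
    have hins : ({ items := d.items ++ [(k, v)] } : PySem.Dict κ ν) = d.insert k v := by
      apply PySem.Dict.ext
      rw [PySem.Dict.items_insert_of_not_contains _ _ _]
      exact hc
    rw [hins, PySem.Dict.get?_insert]
    by_cases h : k' = k <;> simp [h, hn]

-- the index fold, characterised: each dict's lookup is the previous lookup orElse the first match
theorem pvIdx_get? (l : List (String × String × String × String × String)) :
    ∀ (d1 : PySem.Dict (String × String) String) (d2 : PySem.Dict String String) (p d : String),
      ((l.foldl pvIdxStep (d1, d2)).1.get? (p, d) = ((d1.get? (p, d)).or (pvExFind p d l)))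
      ∧ ((l.foldl pvIdxStep (d1, d2)).2.get? p = ((d2.get? p).or (pvPrFind p l))) := by
  induction l with
  | nil => intro d1 d2 p d; simp [pvExFind, pvPrFind]
  | cons m rest ih =>
      intro d1 d2 p d
      obtain ⟨mid, n, prov, c, dist⟩ := m
      simp only [List.foldl, pvIdxStep]
      obtain ⟨ih1, ih2⟩ := ih (d1.setdefault (PySem.Str.lower prov, PySem.Str.lower dist) mid)
        (d2.setdefault (PySem.Str.lower prov) mid) p d
      constructor
      · rw [ih1, get?_setdefault]
        simp only [pvExFind]
        by_cases hp : PySem.Str.lower prov = p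
        · by_cases hd : PySem.Str.lower dist = d
          · simp [hp, hd]
          · simp [hp, hd, Prod.ext_iff, Ne.symm hd]
        · simp [hp, Prod.ext_iff, Ne.symm hp]
      · rw [ih2, get?_setdefault]
        simp only [pvPrFind]
        by_cases hp : PySem.Str.lower prov = p
        · simp [hp]
        · simp [hp, Ne.symm hp]

-- ===== VERDICT =====
theorem pick_market_spec : Claim_equal_pick_market := by
  intro province district _
  unfold Spec_pick_market pick_market pick_market_alt
  by_cases h : province ∈ pvGam
  · simp only [List.contains_eq_mem, h, decide_true, Bool.not_true, Bool.false_eq_true, if_false]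
    obtain ⟨h1, h2⟩ := pvIdx_get? pvMarkets PySem.Dict.empty PySem.Dict.empty
      (PySem.Str.lower province) (PySem.Str.lower district)
    rw [pvALoop1_char, pvALoop2_char]
    simp only [pvBuildIndex, h1, h2, PySem.Dict.get?_empty, Option.none_or]
  · simp [List.contains_eq_mem, h]
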